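-- pv_equiv track=rewrite | github.com/KEYHAN-A/local-ai-agent-orchestrator | src/local_ai_agent_orchestrator/schema_lints.py | _strip_swift_comments_and_strings
-- ===== SOURCE A (Python) =====
-- def _strip_swift_comments_and_strings(text: str) -> str:
--     """
--     Remove // and /* */ comments and string literals so heuristic scans
--     do not flag markers inside documentation or sample code.
--     """
--     out: list[str] = []
--     i = 0
--     n = len(text)
--     while i < n:
--         ch = text[i]
--         if i + 1 < n and ch == "/" and text[i + 1] == "/":
--             i += 2
--             while i < n and text[i] not in "\n\r":
--                 i += 1
--             out.append(" ")
--             continue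
--         if i + 1 < n and ch == "/" and text[i + 1] == "*":
--             i += 2
--             while i + 1 < n and not (text[i] == "*" and text[i + 1] == "/"):
--                 i += 1
--             i = min(i + 2, n)
--             out.append(" ")
--             continue
--         if ch in "\"'":
--             quote = ch
--             i += 1
--             if i < n and quote == "\"" and text[i] == "\"":
--                 if i + 1 < n and text[i + 1] == "\"":
--                     i += 3
--                     while i + 2 < n and not (text[i] == "\"" and text[i + 1] == "\"" and text[i + 2] == "\""):
--                         i += 1
--                     i = min(i + 3, n)
--                 else:
--                     while i < n and text[i] != "\"":
--                         if text[i] == "\\" and i + 1 < n: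
--                             i += 2
--                             continue
--                         i += 1
--                     i = min(i + 1, n)
--                 out.append(" ")
--                 continue
--             while i < n:
--                 if text[i] == "\\" and i + 1 < n:
--                     i += 2
--                     continue
--                 if text[i] == quote:
--                     i += 1
--                     break
--                 i += 1
--             out.append(" ")
--             continue
--         out.append(ch)
--         i += 1
--     return "".join(out)
-- ===== SOURCE B (Python) =====
-- def _strip_swift_comments_and_strings(text: str) -> str:
--     """Single-pass character state machine: each comment or string literal
--     collapses to one space; everything else is copied through."""
--     NORMAL, SLASH, LINE, BLOCK, BLOCK_STAR, STRING, ESCAPE, DQ1, DQ2, TRIPLE = range(10)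
--     out = []
--     state = NORMAL
--     quote = ""
--     quotes_seen = 0
--
--     def enter(ch):
--         nonlocal quote
--         if ch == "/":
--             return SLASH
--         if ch == '"':
--             return DQ1
--         if ch == "'":
--             quote = "'"
--             return STRING
--         out.append(ch)
--         return NORMAL
--
--     def in_string(ch):
--         if ch == "\\":
--             return ESCAPE
--         if ch == quote:
--             out.append(" ")
--             return NORMAL
--         return STRING
--
--     for ch in text:
--         if state == NORMAL:
--             state = enter(ch)
--         elif state == SLASH:
--             if ch == "/":
--                 state = LINE
--             elif ch == "*":
--                 state = BLOCK
--             else: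
--                 out.append("/")
--                 state = enter(ch)
--         elif state == LINE:
--             if ch in "\n\r":
--                 out.append(" ")
--                 out.append(ch)
--                 state = NORMAL
--         elif state == BLOCK:
--             if ch == "*":
--                 state = BLOCK_STAR
--         elif state == BLOCK_STAR:
--             if ch == "/":
--                 out.append(" ")
--                 state = NORMAL
--             elif ch != "*":
--                 state = BLOCK
--         elif state == STRING:
--             state = in_string(ch)
--         elif state == ESCAPE:
--             state = STRING
--         elif state == DQ1:
--             if ch == '"':
--                 state = DQ2
--             else:
--                 quote = '"'
--                 state = in_string(ch)
--         elif state == DQ2: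
--             if ch == '"':
--                 state = TRIPLE
--                 quotes_seen = 0
--             else:
--                 out.append(" ")  # empty string literal ""
--                 state = enter(ch)
--         else:  # TRIPLE
--             if ch == '"':
--                 quotes_seen += 1
--                 if quotes_seen == 3:
--                     out.append(" ")
--                     state = NORMAL
--             else:
--                 quotes_seen = 0
--
--     if state == SLASH:
--         out.append("/")
--     elif state != NORMAL:
--         out.append(" ")
--     return "".join(out)
-- ===== Notes on version B (the rewrite author's own statement) =====
-- stated objective: alternative
-- what changed: A's index-based while loop with nested inner scanning loops, repeated text[i] indexing and min()-clamps is replaced by a single one-pass character state machine (NORMAL/SLASH/LINE/BLOCK/BLOCK_STAR/STRING/ESCAPE/DQ1/DQ2/TRIPLE) that iterates the string directly, consumes one character per step and flushes pending state at EOF; …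
-- outside the precondition, e.g. on _strip_swift_comments_and_strings('""""""x'): A returns ' ', B returns ' x'; on _strip_swift_comments_and_strings('a = """""" + f()'): A returns 'a =  ', B returns 'a =   + f()'
import Mathlib
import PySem

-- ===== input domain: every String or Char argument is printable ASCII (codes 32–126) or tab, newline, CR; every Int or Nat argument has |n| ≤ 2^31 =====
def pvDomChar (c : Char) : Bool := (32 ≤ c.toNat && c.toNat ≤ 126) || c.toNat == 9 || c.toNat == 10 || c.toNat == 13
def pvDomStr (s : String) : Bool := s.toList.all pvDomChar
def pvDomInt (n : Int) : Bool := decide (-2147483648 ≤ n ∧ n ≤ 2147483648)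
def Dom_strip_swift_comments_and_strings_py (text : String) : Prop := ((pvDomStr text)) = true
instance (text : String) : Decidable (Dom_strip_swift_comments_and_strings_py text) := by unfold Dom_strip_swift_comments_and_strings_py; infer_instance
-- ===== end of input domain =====

-- B replaces A's index loop with inner scanning loops by a single one-pass
-- character state machine (alternative decomposition); texts with
-- six consecutive double quotes before the last character are an ambiguous
-- corner excluded by Pre_ below.

-- ===== PORT A =====
-- A's inner `while` loops become the helper recursions dropLine / dropBlock /
-- dropTriple / dropStr over the remaining suffix (text[i:]); A's index i is
-- represented by the suffix of the character list, exact on every input.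
-- dropLine: skip of a `//` body, stops AT (does not consume) '\n'/'\r'.
-- dropBlock: skip of a `/* */` body incl. `*/` (guard i+1<n, clamp min(i+2,n)).
-- dropTriple: skip of a triple-quoted body incl. closing `"""` (guard i+2<n, clamp min(i+3,n)).
-- dropStr: skip of a quoted body: backslash (not last char) skips 2, closing quote ends.
def dropLine : List Char → List Char
  | [] => []
  | c :: r => if c = '\n' ∨ c = '\r' then c :: r else dropLine r

def dropBlock : List Char → List Char
  | [] => []
  | [_] => []
  | c :: d :: r => if c = '*' ∧ d = '/' then r else dropBlock (d :: r)

def dropTriple : List Char → List Char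
  | [] => []
  | [_] => []
  | [_, _] => []
  | c :: d :: e :: r => if c = '"' ∧ d = '"' ∧ e = '"' then r else dropTriple (d :: e :: r)

def dropStr (q : Char) : List Char → List Char
  | [] => []
  | c :: r =>
    if c = '\\' ∧ r ≠ [] then dropStr q r.tail
    else if c = q then r else dropStr q r
  termination_by l => l.length
  decreasing_by all_goals first
  | (have h1 : r.tail.length ≤ r.length := by cases r <;> simp
     simp; omega)
  | (simp; omega)
  | simp

theorem dropLine_len : ∀ l : List Char, (dropLine l).length ≤ l.length := by
  intro l; induction l with
  | nil => simp [dropLine]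
  | cons c r ih =>
    simp only [dropLine]
    split
    · exact Nat.le_refl _
    · simp only [List.length_cons]; omega

theorem dropBlock_len : ∀ l : List Char, (dropBlock l).length ≤ l.length := by
  intro l
  induction l using dropBlock.induct with
  | case1 => simp [dropBlock]
  | case2 => simp [dropBlock]
  | case3 c d r h => rw [dropBlock, if_pos h]; simp; omega
  | case4 c d r h ih => rw [dropBlock, if_neg h]; simp only [List.length_cons] at ih ⊢; omega

theorem dropTriple_len : ∀ l : List Char, (dropTriple l).length ≤ l.length := by
  intro l
  induction l using dropTriple.induct with
  | case1 => simp [dropTriple]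
  | case2 => simp [dropTriple]
  | case3 => simp [dropTriple]
  | case4 c d e r h => rw [dropTriple, if_pos h]; simp; omega
  | case5 c d e r h ih => rw [dropTriple, if_neg h]; simp only [List.length_cons] at ih ⊢; omega

theorem dropStr_len : ∀ (q : Char) (l : List Char), (dropStr q l).length ≤ l.length := by
  intro q l
  induction l using dropStr.induct q with
  | case1 => simp [dropStr]
  | case2 c r h ih =>
    rw [dropStr, if_pos h]
    have h2 : r.tail.length ≤ r.length := by cases r <;> simp
    simp only [List.length_cons]; omega
  | case3 r h =>
    rw [dropStr, if_neg h, if_pos rfl]; simp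
  | case4 c r h hne ih =>
    rw [dropStr, if_neg h, if_neg hne]
    simp only [List.length_cons] at ih ⊢; omega

def goA : List Char → List Char
  | [] => []
  | c :: r =>
    if c = '/' then
      match r with
      | [] => c :: goA []
      | d :: r2 =>
        if d = '/' then ' ' :: goA (dropLine r2)
        else if d = '*' then ' ' :: goA (dropBlock r2)
        else c :: goA (d :: r2)
    else if c = '"' then
      match r with
      | [] => ' ' :: goA (dropStr '"' [])
      | d :: r2 =>
        if d = '"' then
          match r2 with
          | [] => ' ' :: goA []
          | e :: r3 =>
            if e = '"' then ' ' :: goA (dropTriple r3.tail)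
            else ' ' :: goA (e :: r3)
        else ' ' :: goA (dropStr '"' (d :: r2))
    else if c = '\'' then ' ' :: goA (dropStr '\'' r)
    else c :: goA r
  termination_by l => l.length
  decreasing_by all_goals first
  | (simp; done)
  | (have h1 := dropLine_len r2; simp; omega)
  | (have h1 := dropBlock_len r2; simp; omega)
  | (have h1 := dropTriple_len r3.tail
     have h2 : r3.tail.length ≤ r3.length := by cases r3 <;> simp
     simp; omega)
  | (have h1 := dropStr_len '"' (d :: r2); simp only [List.length_cons] at h1 ⊢; omega)
  | (have h1 := dropStr_len '"' ([] : List Char); simp at h1 ⊢; omega)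
  | (have h1 := dropStr_len '\'' r; simp; omega)
  | (simp; omega)

def strip_swift_comments_and_strings_py (text : String) : String :=
  String.mk (goA text.toList)

-- ===== PORT B =====
-- one-pass state machine from Source B: states NORMAL/SLASH/LINE/BLOCK/BLOCK_STAR/
-- STRING q/ESCAPE q/DQ1/DQ2/TRIPLE k; normStep = Source B enter, strStep =
-- Source B in_string, stepB = the per-character dispatch, finishB = the EOF flush.
inductive BState where
  | norm | slash | line | block | blockStar
  | str (q : Char) | esc (q : Char)
  | dq1 | dq2
  | triple (k : Nat)
deriving DecidableEq, Repr

def normStep (c : Char) : List Char × BState :=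
  if c = '/' then ([], .slash)
  else if c = '"' then ([], .dq1)
  else if c = '\'' then ([], .str '\'')
  else ([c], .norm)

def strStep (q : Char) (c : Char) : List Char × BState :=
  if c = '\\' then ([], .esc q)
  else if c = q then ([' '], .norm)
  else ([], .str q)

def stepB : BState → Char → List Char × BState
  | .norm, c => normStep c
  | .slash, c =>
      if c = '/' then ([], .line)
      else if c = '*' then ([], .block)
      else ('/' :: (normStep c).1, (normStep c).2)
  | .line, c => if c = '\n' ∨ c = '\r' then ([' ', c], .norm) else ([], .line)
  | .block, c => if c = '*' then ([], .blockStar) else ([], .block)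
  | .blockStar, c =>
      if c = '/' then ([' '], .norm)
      else if c = '*' then ([], .blockStar)
      else ([], .block)
  | .str q, c => strStep q c
  | .esc q, _ => ([], .str q)
  | .dq1, c => if c = '"' then ([], .dq2) else strStep '"' c
  | .dq2, c => if c = '"' then ([], .triple 0) else (' ' :: (normStep c).1, (normStep c).2)
  | .triple k, c =>
      if c = '"' then (if k + 1 = 3 then ([' '], .norm) else ([], .triple (k + 1)))
      else ([], .triple 0)

def finishB : BState → List Char
  | .norm => []
  | .slash => ['/']
  | _ => [' ']

def runB : BState → List Char → List Char
  | s, [] => finishB s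
  | s, c :: r => (stepB s c).1 ++ runB (stepB s c).2 r

def strip_swift_comments_and_strings_py_alt (text : String) : String :=
  String.mk (runB .norm text.toList)

-- ===== PRECONDITION & SPEC =====
-- Pre_ excludes texts containing six consecutive double quotes before the last
-- character: there the delimiter run is ambiguous (an empty triple-quoted
-- literal closed immediately, as B reads it, vs. A's unterminated-literal
-- reading, whose scan for the closing """ starts one character late) and
-- neither reading is specified; A still returns a value on these inputs.
def Pre_strip_swift_comments_and_strings_py (text : String) : Prop :=
  PySem.Chars.isIn ['"', '"', '"', '"', '"', '"'] text.toList.dropLast = false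
instance (text : String) : Decidable (Pre_strip_swift_comments_and_strings_py text) := by
  unfold Pre_strip_swift_comments_and_strings_py; infer_instance

def pvWitness_strip_swift_comments_and_strings_py : String := "let x = 1 // hi"

def Spec_strip_swift_comments_and_strings_py (text : String) (out : String) : Prop :=
  out = strip_swift_comments_and_strings_py_alt text
instance (text : String) (out : String) : Decidable (Spec_strip_swift_comments_and_strings_py text out) := by
  unfold Spec_strip_swift_comments_and_strings_py; infer_instance

-- ===== CLAIM (what is proved, stated in full; the proofs are below) =====
def Claim_equal_strip_swift_comments_and_strings_py : Prop := ∀ (text : String), Dom_strip_swift_comments_and_strings_py text → Pre_strip_swift_comments_and_strings_py text → Spec_strip_swift_comments_and_strings_py text (strip_swift_comments_and_strings_py text)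

-- ===== LEMMAS AND PROOFS =====

-- characterization lemmas for goA on each shape
theorem goA_nil : goA [] = [] := by rw [goA.eq_def]
theorem goA_slash_nil : goA ['/'] = ['/'] := by rw [goA.eq_def]; simp [goA_nil]
theorem goA_slash_slash (r : List Char) : goA ('/' :: '/' :: r) = ' ' :: goA (dropLine r) := by
  rw [goA.eq_def]; simp
theorem goA_slash_star (r : List Char) : goA ('/' :: '*' :: r) = ' ' :: goA (dropBlock r) := by
  rw [goA.eq_def]; simp
theorem goA_slash_other {d : Char} (h1 : ¬ d = '/') (h2 : ¬ d = '*') (r : List Char) :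
    goA ('/' :: d :: r) = '/' :: goA (d :: r) := by
  rw [goA.eq_def]; simp [h1, h2]
theorem goA_q_nil : goA ['"'] = [' '] := by rw [goA.eq_def]; simp [dropStr, goA_nil]
theorem goA_qq_nil : goA ['"', '"'] = [' '] := by rw [goA.eq_def]; simp [goA_nil]
theorem goA_qqq (r : List Char) : goA ('"' :: '"' :: '"' :: r) = ' ' :: goA (dropTriple r.tail) := by
  rw [goA.eq_def]; simp
theorem goA_qq_other {e : Char} (h : ¬ e = '"') (r : List Char) :
    goA ('"' :: '"' :: e :: r) = ' ' :: goA (e :: r) := by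
  rw [goA.eq_def]; simp [h]
theorem goA_q_other {d : Char} (h : ¬ d = '"') (r : List Char) :
    goA ('"' :: d :: r) = ' ' :: goA (dropStr '"' (d :: r)) := by
  rw [goA.eq_def]; simp [h]
theorem goA_sq (r : List Char) : goA ('\'' :: r) = ' ' :: goA (dropStr '\'' r) := by
  rw [goA.eq_def]; simp
theorem goA_other {c : Char} (h1 : ¬ c = '/') (h2 : ¬ c = '"') (h3 : ¬ c = '\'') (r : List Char) :
    goA (c :: r) = c :: goA r := by
  rw [goA.eq_def]; simp [h1, h2, h3]

-- the skip helpers return suffixes of their input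
theorem dropLine_suffix : ∀ l : List Char, dropLine l <:+ l := by
  intro l; induction l with
  | nil => simp [dropLine]
  | cons c r ih =>
    simp only [dropLine]
    split
    · exact List.suffix_refl _
    · exact ih.trans (List.suffix_cons c r)

theorem dropBlock_suffix : ∀ l : List Char, dropBlock l <:+ l := by
  intro l
  induction l using dropBlock.induct with
  | case1 => simp [dropBlock]
  | case2 => simp [dropBlock]
  | case3 c d r h => rw [dropBlock, if_pos h]; exact (List.suffix_cons d r).trans (List.suffix_cons c _)
  | case4 c d r h ih => rw [dropBlock, if_neg h]; exact ih.trans (List.suffix_cons c _)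

theorem dropTriple_suffix : ∀ l : List Char, dropTriple l <:+ l := by
  intro l
  induction l using dropTriple.induct with
  | case1 => simp [dropTriple]
  | case2 => simp [dropTriple]
  | case3 => simp [dropTriple]
  | case4 c d e r h =>
    rw [dropTriple, if_pos h]
    exact ((List.suffix_cons e r).trans (List.suffix_cons d _)).trans (List.suffix_cons c _)
  | case5 c d e r h ih => rw [dropTriple, if_neg h]; exact ih.trans (List.suffix_cons c _)

theorem dropStr_suffix : ∀ (q : Char) (l : List Char), dropStr q l <:+ l := by
  intro q l
  induction l using dropStr.induct q with
  | case1 => simp [dropStr]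
  | case2 c r h ih =>
    rw [dropStr, if_pos h]
    have h2 : r.tail <:+ r := by cases r <;> simp
    exact (ih.trans h2).trans (List.suffix_cons c r)
  | case3 r h =>
    rw [dropStr, if_neg h, if_pos rfl]; exact List.suffix_cons _ _
  | case4 c r h hne ih =>
    rw [dropStr, if_neg h, if_neg hne]; exact ih.trans (List.suffix_cons c _)

-- "no six consecutive double quotes strictly before the last character"
-- is inherited by suffixes of the scanned text
theorem noSix_suffix {l' l : List Char} (h : l' <:+ l)
    (hD : ¬ (List.replicate 6 '"') <:+: l.dropLast) :
    ¬ (List.replicate 6 '"') <:+: l'.dropLast := by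
  intro hinf
  apply hD
  obtain ⟨s, rfl⟩ := h
  rcases eq_or_ne l' [] with rfl | hne
  · simp at hinf
  · rw [List.dropLast_append_of_ne_nil hne]
    exact hinf.trans (List.suffix_append s l'.dropLast).isInfix

-- A's triple scan starts one character late; when no closing """ starts at the
-- very first content position (with more input after it), that does not matter
theorem dropTriple_eq_tail {r : List Char}
    (h : ¬ ∃ x r4, r = '"' :: '"' :: '"' :: x :: r4) :
    dropTriple r = dropTriple r.tail := by
  match r with
  | [] => simp [dropTriple]
  | [c] => simp [dropTriple]
  | [c, d] => simp [dropTriple]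
  | c :: d :: e :: r' =>
    by_cases hq : c = '"' ∧ d = '"' ∧ e = '"'
    · obtain ⟨rfl, rfl, rfl⟩ := hq
      cases r' with
      | nil => simp [dropTriple]
      | cons x r4 => exact absurd ⟨x, r4, rfl⟩ h
    · rw [dropTriple, if_neg hq]; rfl

theorem runB_line : ∀ r : List Char, runB .line r = ' ' :: runB .norm (dropLine r) := by
  intro r; induction r with
  | nil => simp [runB, finishB, dropLine]
  | cons c r ih =>
    by_cases h : c = '\n' ∨ c = '\r'
    · rcases h with h | h <;> subst h <;> simp [runB, stepB, dropLine, normStep]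
    · simp [runB, stepB, dropLine, h, ih]

theorem dropBlock_cons_ne {c : Char} (h : ¬ c = '*') (r : List Char) :
    dropBlock (c :: r) = dropBlock r := by
  cases r with
  | nil => simp [dropBlock]
  | cons d r2 => rw [dropBlock, if_neg (by simp [h])]

theorem runB_block : ∀ r : List Char,
    runB .block r = ' ' :: runB .norm (dropBlock r) ∧
    runB .blockStar r = ' ' :: runB .norm (dropBlock ('*' :: r)) := by
  intro r; induction r with
  | nil => simp [runB, finishB, dropBlock]
  | cons c r ih =>
    constructor
    · by_cases h : c = '*'
      · subst h; simpa [runB, stepB] using ih.2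
      · simp [runB, stepB, h, dropBlock_cons_ne h, ih.1]
    · by_cases h : c = '/'
      · subst h; simp [runB, stepB, dropBlock]
      · by_cases h2 : c = '*'
        · subst h2
          rw [show dropBlock ('*' :: '*' :: r) = dropBlock ('*' :: r) by
                rw [dropBlock, if_neg (by simp [h])]]
          simpa [runB, stepB] using ih.2
        · rw [show dropBlock ('*' :: c :: r) = dropBlock r by
                rw [dropBlock, if_neg (by simp [h])]; exact dropBlock_cons_ne h2 r]
          simpa [runB, stepB, h, h2] using ih.1

theorem runB_str : ∀ (r : List Char) (q : Char), (q = '"' ∨ q = '\'') →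
    runB (.str q) r = ' ' :: runB .norm (dropStr q r) ∧
    runB (.esc q) r = ' ' :: runB .norm (dropStr q ('\\' :: r)) := by
  intro r
  induction r with
  | nil =>
    intro q hq
    have hq' : ¬ ('\\' = q) := by rcases hq with h | h <;> subst h <;> decide
    have hbs : dropStr q ['\\'] = [] := by
      rw [dropStr, if_neg (by simp), if_neg hq', dropStr]
    constructor
    · simp [runB, finishB, dropStr]
    · rw [hbs]; simp [runB, finishB]
  | cons c r ih =>
    intro q hq
    obtain ⟨ih1, ih2⟩ := ih q hq
    have hq'' : ¬ (q = '\\') := by rcases hq with h | h <;> subst h <;> decide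
    constructor
    · by_cases h : c = '\\'
      · subst h; simpa [runB, stepB, strStep] using ih2
      · by_cases h2 : c = q
        · rw [show dropStr q (c :: r) = r by
                rw [dropStr, if_neg (by simp [h]), if_pos h2]]
          simp [runB, stepB, strStep, h2, hq'']
        · rw [show dropStr q (c :: r) = dropStr q r by
                rw [dropStr, if_neg (by simp [h]), if_neg h2]]
          simpa [runB, stepB, strStep, h, h2] using ih1
    · rw [show dropStr q ('\\' :: c :: r) = dropStr q r by
            rw [dropStr, if_pos (by simp)]; rfl]
      simpa [runB, stepB] using ih1

theorem dropTriple_cons_ne {c : Char} (h : ¬ c = '"') (r : List Char) :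
    dropTriple (c :: r) = dropTriple r := by
  cases r with
  | nil => simp [dropTriple]
  | cons d r2 => cases r2 with
    | nil => simp [dropTriple]
    | cons e r3 =>
      rw [dropTriple, if_neg (by simp [h])]

theorem dropTriple_q_cons_ne {c : Char} (h : ¬ c = '"') (r : List Char) :
    dropTriple ('"' :: c :: r) = dropTriple r := by
  cases r with
  | nil => simp [dropTriple]
  | cons e r3 =>
    rw [dropTriple, if_neg (by simp [h])]
    exact dropTriple_cons_ne h _

theorem dropTriple_qq_cons_ne {c : Char} (h : ¬ c = '"') (r : List Char) :
    dropTriple ('"' :: '"' :: c :: r) = dropTriple r := by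
  rw [dropTriple, if_neg (by simp [h])]; exact dropTriple_q_cons_ne h r

theorem runB_triple : ∀ (r : List Char) (k : Nat), k ≤ 2 →
    runB (.triple k) r = ' ' :: runB .norm (dropTriple (List.replicate k '"' ++ r)) := by
  intro r
  induction r with
  | nil =>
    intro k hk
    obtain h | h | h : k = 0 ∨ k = 1 ∨ k = 2 := by omega
    all_goals subst h
    all_goals simp [runB, finishB, dropTriple, List.replicate]
  | cons c r ih =>
    intro k hk
    by_cases h : c = '"'
    · subst h
      by_cases h3 : k + 1 = 3
      · have hk2 : k = 2 := by omega
        subst hk2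
        rw [show (List.replicate 2 '"' ++ '"' :: r) = '"' :: '"' :: '"' :: r by simp [List.replicate]]
        rw [dropTriple, if_pos (by simp)]
        simp [runB, stepB]
      · have hk1 : k + 1 ≤ 2 := by omega
        have hih := ih (k + 1) hk1
        rw [show (List.replicate k '"' ++ '"' :: r) = List.replicate (k+1) '"' ++ r by
              rw [List.replicate_succ']; simp]
        rw [show runB (.triple k) ('"' :: r) = runB (.triple (k+1)) r by
              simp [runB, stepB, h3]]
        exact hih
    · have hih := ih 0 (by omega)
      have hdrop : dropTriple (List.replicate k '"' ++ c :: r) = dropTriple r := by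
        obtain h0 | h0 | h0 : k = 0 ∨ k = 1 ∨ k = 2 := by omega
        all_goals subst h0
        · simpa [List.replicate] using dropTriple_cons_ne h r
        · simpa [List.replicate] using dropTriple_q_cons_ne h r
        · simpa [List.replicate] using dropTriple_qq_cons_ne h r
      rw [hdrop]
      rw [show runB (.triple k) (c :: r) = runB (.triple 0) r by simp [runB, stepB, h]]
      exact hih

theorem runB_dq1_ne {d : Char} (h : ¬ d = '"') (r : List Char) :
    runB .dq1 (d :: r) = runB (.str '"') (d :: r) := by
  simp [runB, stepB, h]

theorem runB_dq2_ne {e : Char} (h : ¬ e = '"') (r : List Char) :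
    runB .dq2 (e :: r) = ' ' :: runB .norm (e :: r) := by
  simp [runB, stepB, h]

theorem runB_slash_other {d : Char} (h : ¬ d = '/') (h2 : ¬ d = '*') (r : List Char) :
    runB .slash (d :: r) = '/' :: runB .norm (d :: r) := by
  simp [runB, stepB, h, h2]

theorem goA_eq_runB : ∀ (N : Nat) (l : List Char), l.length ≤ N →
    ¬ (List.replicate 6 '"') <:+: l.dropLast → goA l = runB .norm l := by
  intro N
  induction N with
  | zero =>
    intro l hl _
    have h : l = [] := by cases l <;> simp_all
    subst h; simp [goA_nil, runB, finishB]
  | succ N ih =>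
    intro l hl hD
    cases l with
    | nil => simp [goA_nil, runB, finishB]
    | cons c r =>
      simp only [List.length_cons] at hl
      by_cases hc : c = '/'
      · subst hc
        cases r with
        | nil => simp [goA_slash_nil, runB, stepB, normStep, finishB]
        | cons d r2 =>
          simp only [List.length_cons] at hl
          have hsuf2 : r2 <:+ '/' :: d :: r2 :=
            (List.suffix_cons d r2).trans (List.suffix_cons '/' _)
          by_cases hd : d = '/'
          · subst hd
            rw [goA_slash_slash,
                ih _ (Nat.le_trans (dropLine_len r2) (by omega))
                  (noSix_suffix ((dropLine_suffix r2).trans hsuf2) hD)]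
            rw [show runB .norm ('/' :: '/' :: r2) = runB .line r2 by
                  simp [runB, stepB, normStep]]
            rw [runB_line]
          · by_cases he : d = '*'
            · subst he
              rw [goA_slash_star,
                  ih _ (Nat.le_trans (dropBlock_len r2) (by omega))
                    (noSix_suffix ((dropBlock_suffix r2).trans hsuf2) hD)]
              rw [show runB .norm ('/' :: '*' :: r2) = runB .block r2 by
                    simp [runB, stepB, normStep]]
              rw [(runB_block r2).1]
            · rw [goA_slash_other hd he,
                  ih (d :: r2) (by simp; omega)
                    (noSix_suffix (List.suffix_cons '/' _) hD)]
              rw [show runB .norm ('/' :: d :: r2) = runB .slash (d :: r2) by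
                    simp [runB, stepB, normStep]]
              rw [runB_slash_other hd he]
      · by_cases hq : c = '"'
        · subst hq
          cases r with
          | nil => simp [goA_q_nil, runB, stepB, normStep, finishB]
          | cons d r2 =>
            simp only [List.length_cons] at hl
            by_cases hd : d = '"'
            · subst hd
              cases r2 with
              | nil => simp [goA_qq_nil, runB, stepB, normStep, finishB]
              | cons e r3 =>
                simp only [List.length_cons] at hl
                by_cases he : e = '"'
                · subst he
                  rw [goA_qqq]
                  have hr3 : ¬ ∃ x r4, r3 = '"' :: '"' :: '"' :: x :: r4 := by
                    rintro ⟨x, r4, rfl⟩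
                    apply hD
                    rw [show ('"' :: '"' :: '"' :: '"' :: '"' :: '"' :: x :: r4) =
                          List.replicate 6 '"' ++ (x :: r4) by rfl]
                    rw [List.dropLast_append_of_ne_nil (by simp)]
                    exact (List.prefix_append _ _).isInfix
                  rw [← dropTriple_eq_tail hr3]
                  have hsuf : dropTriple r3 <:+ '"' :: '"' :: '"' :: r3 :=
                    (dropTriple_suffix r3).trans
                      (((List.suffix_cons '"' r3).trans (List.suffix_cons '"' _)).trans
                        (List.suffix_cons '"' _))
                  rw [ih _ (Nat.le_trans (dropTriple_len r3) (by omega))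
                        (noSix_suffix hsuf hD)]
                  rw [show runB .norm ('"' :: '"' :: '"' :: r3) = runB (.triple 0) r3 by
                        simp [runB, stepB, normStep]]
                  rw [runB_triple r3 0 (by omega)]
                  simp [List.replicate]
                · rw [goA_qq_other he,
                      ih (e :: r3) (by simp; omega)
                        (noSix_suffix ((List.suffix_cons '"' _).trans (List.suffix_cons '"' _)) hD)]
                  rw [show runB .norm ('"' :: '"' :: e :: r3) = runB .dq2 (e :: r3) by
                        simp [runB, stepB, normStep]]
                  rw [runB_dq2_ne he]
            · have hsuf : dropStr '"' (d :: r2) <:+ '"' :: d :: r2 :=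
                (dropStr_suffix '"' (d :: r2)).trans (List.suffix_cons '"' _)
              rw [goA_q_other hd,
                  ih _ (Nat.le_trans (dropStr_len '"' (d :: r2)) (by simp; omega))
                    (noSix_suffix hsuf hD)]
              rw [show runB .norm ('"' :: d :: r2) = runB .dq1 (d :: r2) by
                    simp [runB, stepB, normStep]]
              rw [runB_dq1_ne hd]
              rw [(runB_str (d :: r2) '"' (Or.inl rfl)).1]
        · by_cases hs : c = '\''
          · subst hs
            rw [goA_sq,
                ih _ (Nat.le_trans (dropStr_len '\'' r) (by omega))
                  (noSix_suffix ((dropStr_suffix '\'' r).trans (List.suffix_cons '\'' r)) hD)]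
            rw [show runB .norm ('\'' :: r) = runB (.str '\'') r by
                  simp [runB, stepB, normStep]]
            rw [(runB_str r '\'' (Or.inr rfl)).1]
          · rw [goA_other hc hq hs,
                ih r (by omega) (noSix_suffix (List.suffix_cons c r) hD)]
            simp [runB, stepB, normStep, hc, hq, hs]

-- ===== VERDICT (by name: the statement is the Claim_ definition above) =====
theorem strip_swift_comments_and_strings_py_spec : Claim_equal_strip_swift_comments_and_strings_py := by
  intro text _ hPre
  show String.mk (goA text.toList) = String.mk (runB .norm text.toList)
  refine congrArg String.mk (goA_eq_runB text.toList.length text.toList le_rfl ?_)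
  rw [show (List.replicate 6 '"') = ['"', '"', '"', '"', '"', '"'] from rfl]
  exact (PySem.Chars.isIn_eq_false_iff _ _).mp hPre
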